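-- pv_equiv track=rewrite | github.com/Code4Epoch/Bolaris | BiliBili_live_summary/wordcloud_maker.py | combine_single_and_lower_char
-- ===== SOURCE A (Python) =====
-- def combine_single_and_lower_char(sentence):
--     sentence = sentence.lower()
--     max_repeat = 3
--
--     if len(sentence) <= max_repeat:
--         return sentence
--
--     now = ''
--     repeat = 0
--     new_sentence = ''
--     for i in range(0, len(sentence)):
--
--         if sentence[i] == now:
--             repeat += 1
--             if repeat < max_repeat:
--                 new_sentence += sentence[i]
--         else:
--             repeat = 0
--             new_sentence += sentence[i]
--             now = sentence[i]
--     return new_sentence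
-- ===== SOURCE B (Python) =====
-- def combine_single_and_lower_char(sentence):
--     s = sentence.lower()
--     n = len(s)
--     parts = []
--     i = 0
--     while i < n:
--         j = i
--         while j < n and s[j] == s[i]:
--             j += 1
--         parts.append(s[i] * min(j - i, 3))
--         i = j
--     return ''.join(parts)
-- ===== Notes on version B (the rewrite author's own statement) =====
-- stated objective: alternative
-- what changed: B replaces A's single char-by-char scan with stateful now/repeat counters by a two-pointer run-length decomposition: it finds each maximal run of equal characters, emits min(run,3) copies, and joins the pieces; the length<=3 early return disappears.
import Mathlib
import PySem

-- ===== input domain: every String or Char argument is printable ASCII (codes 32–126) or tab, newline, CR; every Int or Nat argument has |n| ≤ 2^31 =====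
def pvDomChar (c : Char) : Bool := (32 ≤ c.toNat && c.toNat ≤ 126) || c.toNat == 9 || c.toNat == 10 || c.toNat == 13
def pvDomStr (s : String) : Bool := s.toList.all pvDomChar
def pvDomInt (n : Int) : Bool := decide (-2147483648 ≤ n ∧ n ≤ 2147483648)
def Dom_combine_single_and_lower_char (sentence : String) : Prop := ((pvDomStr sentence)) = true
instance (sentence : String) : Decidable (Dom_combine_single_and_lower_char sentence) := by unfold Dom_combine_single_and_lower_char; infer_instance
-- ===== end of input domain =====

-- B collapses runs by a two-pointer run-length decomposition instead of A's stateful now/repeat scan; same values everywhere.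

-- ===== PORT A =====
-- A's loop state: now (last seen char as a Python string), repeat, new_sentence.
def pvAStep (st : List Char × Int × List Char) (c : Char) : List Char × Int × List Char :=
  let (now, repeat_, acc) := st
  if [c] = now then
    let r := repeat_ + 1
    if r < 3 then (now, r, acc ++ [c]) else (now, r, acc)
  else ([c], 0, acc ++ [c])

def combine_single_and_lower_char (sentence : String) : String :=
  let s := PySem.Str.lower sentence
  if s.toList.length ≤ 3 then s
  else String.ofList (s.toList.foldl pvAStep ([], 0, [])).2.2

-- ===== PORT B =====
-- B's run decomposition: peel the maximal run of the head char, emit min(run,3) copies, recurse.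
def pvBRuns : List Char → List Char
  | [] => []
  | c :: rest =>
    List.replicate (min ((rest.takeWhile (· = c)).length + 1) 3) c
      ++ pvBRuns (rest.dropWhile (· = c))
termination_by cs => cs.length
decreasing_by
  simp only [List.length_cons]
  exact Nat.lt_succ_of_le (List.length_dropWhile_le _ _)

def combine_single_and_lower_char_alt (sentence : String) : String :=
  String.ofList (pvBRuns (PySem.Str.lower sentence).toList)

-- ===== PRECONDITION & SPEC =====
def Spec_combine_single_and_lower_char (sentence : String) (out : String) : Prop := out = combine_single_and_lower_char_alt sentence
instance (sentence : String) (out : String) : Decidable (Spec_combine_single_and_lower_char sentence out) := by unfold Spec_combine_single_and_lower_char; infer_instance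

-- ===== CLAIM (what is proved, stated in full; the proofs are below) =====
def Claim_equal_combine_single_and_lower_char : Prop := ∀ (sentence : String), Dom_combine_single_and_lower_char sentence → Spec_combine_single_and_lower_char sentence (combine_single_and_lower_char sentence)

-- ===== LEMMAS AND PROOFS =====

-- takeWhile (· = c) is a block of copies of c
lemma takeWhile_eq_replicate (c : Char) : ∀ (t : List Char),
    t.takeWhile (· = c) = List.replicate (t.takeWhile (· = c)).length c := by
  intro t
  induction t with
  | nil => simp
  | cons d t ih =>
    by_cases h : d = c
    · subst h; simpa [List.replicate_succ] using ih
    · simp [h]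

lemma head?_dropWhile_ne (c : Char) (t : List Char) (d : Char)
    (h : (t.dropWhile (· = c)).head? = some d) : d ≠ c := by
  have := List.head?_dropWhile_not (fun x => decide (x = c)) t
  rw [h] at this
  simpa using this

-- processing k more copies of c from a fresh-run state ([c], r, acc)
lemma foldA_replicate (c : Char) : ∀ (k : ℕ) (r : ℕ) (acc : List Char),
    (List.replicate k c).foldl pvAStep ([c], (r : Int), acc)
      = ([c], ((r + k : ℕ) : Int), acc ++ List.replicate (min k (2 - r)) c) := by
  intro k
  induction k with
  | zero => intro r acc; simp
  | succ k ih =>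
    intro r acc
    rw [List.replicate_succ, List.foldl_cons]
    have hstep : pvAStep ([c], (r : Int), acc) c
        = ([c], ((r + 1 : ℕ) : Int), acc ++ (if r + 1 < 3 then [c] else [])) := by
      simp only [pvAStep]
      by_cases h : r + 1 < 3
      · have : ((r : Int) + 1) < 3 := by exact_mod_cast h
        simp [this, h]
      · have : ¬ ((r : Int) + 1) < 3 := by exact_mod_cast h
        simp [this, h]
    rw [hstep, ih (r + 1)]
    simp only [Prod.mk.injEq, List.append_assoc]
    refine ⟨trivial, by push_cast; ring, ?_⟩
    congr 1
    by_cases h : r + 1 < 3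
    · have h1 : min (k + 1) (2 - r) = min k (2 - (r + 1)) + 1 := by omega
      simp [h, h1, List.replicate_succ]
    · have h1 : 2 - r = 0 := by omega
      have h2 : 2 - (r + 1) = 0 := by omega
      simp [h, h1, h2]

-- main invariant: from a state whose `now` does not match the next char,
-- A's fold appends exactly B's run decomposition
lemma foldA_main : ∀ (cs : List Char) (now : List Char) (r : Int) (acc : List Char),
    (∀ d, cs.head? = some d → [d] ≠ now) →
    (cs.foldl pvAStep (now, r, acc)).2.2 = acc ++ pvBRuns cs := by
  intro cs
  induction cs using pvBRuns.induct with
  | case1 => intro now r acc _; simp [pvBRuns]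
  | case2 c rest ih =>
    intro now r acc hne
    have hcn : [c] ≠ now := hne c rfl
    rw [List.foldl_cons]
    have hstep : pvAStep (now, r, acc) c = ([c], 0, acc ++ [c]) := by
      simp [pvAStep, hcn]
    rw [hstep]
    have hsplit : rest = rest.takeWhile (· = c) ++ rest.dropWhile (· = c) :=
      (List.takeWhile_append_dropWhile).symm
    set k := (rest.takeWhile (· = c)).length with hk
    have hrep : rest.takeWhile (· = c) = List.replicate k c := takeWhile_eq_replicate c rest
    conv_lhs => rw [hsplit, hrep]
    rw [List.foldl_append]
    have h0 : (0 : Int) = ((0 : ℕ) : Int) := rfl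
    rw [h0, foldA_replicate c k 0 (acc ++ [c])]
    rw [ih [c] (((0 + k : ℕ) : Int)) ((acc ++ [c]) ++ List.replicate (min k (2 - 0)) c)
      (by
        intro d hd hdc
        exact head?_dropWhile_ne c rest d hd (by simpa using hdc))]
    show acc ++ [c] ++ List.replicate (min k 2) c ++ pvBRuns (rest.dropWhile (· = c))
      = acc ++ pvBRuns (c :: rest)
    rw [pvBRuns]
    have hmin : min (k + 1) 3 = min k 2 + 1 := by omega
    rw [hmin, List.replicate_succ]
    simp

-- short strings are unchanged by B's run decomposition
lemma pvBRuns_short : ∀ (cs : List Char), cs.length ≤ 3 → pvBRuns cs = cs := by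
  intro cs
  induction cs using pvBRuns.induct with
  | case1 => intro _; simp [pvBRuns]
  | case2 c rest ih =>
    intro hlen
    rw [pvBRuns]
    set k := (rest.takeWhile (· = c)).length with hk
    have hkle : k ≤ rest.length := (List.takeWhile_sublist _).length_le
    have hlen' : rest.length ≤ 2 := by simp [List.length_cons] at hlen; omega
    have hmin : min (k + 1) 3 = k + 1 := by omega
    have hdlen : (rest.dropWhile (· = c)).length ≤ 3 := by
      have := List.length_dropWhile_le (p := (· = c)) (l := rest); omega
    rw [hmin, ih hdlen, List.replicate_succ]
    have hrep : rest.takeWhile (· = c) = List.replicate k c := takeWhile_eq_replicate c rest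
    calc c :: List.replicate k c ++ rest.dropWhile (· = c)
        = c :: (rest.takeWhile (· = c) ++ rest.dropWhile (· = c)) := by rw [hrep]; simp
      _ = c :: rest := by rw [List.takeWhile_append_dropWhile]

-- ===== VERDICT (by name: the statement is the Claim_ definition above) =====
theorem combine_single_and_lower_char_spec : Claim_equal_combine_single_and_lower_char := by
  intro sentence _
  unfold Spec_combine_single_and_lower_char
  unfold combine_single_and_lower_char combine_single_and_lower_char_alt
  set s := PySem.Str.lower sentence with hs
  by_cases h : s.toList.length ≤ 3
  · simp only [h, if_true]
    rw [pvBRuns_short s.toList h]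
    exact String.ofList_toList.symm
  · simp only [h, if_false]
    rw [foldA_main s.toList [] 0 [] (by intro d _ hd; simp at hd)]
    simp
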